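-- pv_equiv track=rewrite | github.com/ewhacote/cherry | 2개 이하로 다른 비트/solution.py | solution
-- ===== SOURCE A (Python) =====
-- def solution(numbers):
--     answer = []
--     for i in numbers:
--         num = i
--         count = 0
--         while i % 2 == 1:
--             count += 1
--             i //= 2
--         answer.append(num + 2 ** (count - 1) if count else num + 1)
--
--     return answer
-- ===== SOURCE B (Python) =====
-- def _low(i):
--     # 2 ** (number of trailing 1-bits of i), for i != -1
--     return 1 if i % 2 == 0 else 2 * _low(i // 2)
--
--
-- def solution(numbers):
--     return [i + 1 if i % 2 == 0 else i + _low(i // 2) for i in numbers]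
-- ===== Notes on version B (the rewrite author's own statement) =====
-- stated objective: simpler
-- what changed: Replaces the explicit while loop with counter and the 2**(count-1) power by a single map over the list with a small recursive helper that accumulates the power-of-two directly (no counter, no exponentiation, no appends).
-- outside the precondition, e.g. on solution([-1]): A does not finish within the time limit, B raises RecursionError
import Mathlib
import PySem

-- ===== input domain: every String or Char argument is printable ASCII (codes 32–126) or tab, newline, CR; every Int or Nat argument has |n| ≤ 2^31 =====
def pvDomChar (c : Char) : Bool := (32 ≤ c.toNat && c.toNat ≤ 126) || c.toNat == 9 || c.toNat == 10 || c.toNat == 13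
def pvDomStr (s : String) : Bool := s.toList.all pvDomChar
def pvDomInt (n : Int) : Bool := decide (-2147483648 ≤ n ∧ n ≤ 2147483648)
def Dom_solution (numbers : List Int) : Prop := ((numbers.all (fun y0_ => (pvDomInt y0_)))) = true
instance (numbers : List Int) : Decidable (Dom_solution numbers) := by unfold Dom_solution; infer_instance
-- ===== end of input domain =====

-- B replaces A's while loop + counter + 2**(count-1) by a map with a recursive
-- helper accumulating the power of two directly (objective: simpler).

-- ===== PORT A =====
-- the while loop `while i % 2 == 1: count += 1; i //= 2`; fuel only makes the
-- recursion total (i.natAbs + 1 steps always suffice for i ≠ -1)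
def solLoop : Nat → Int → Nat → Nat
  | 0, _, c => c
  | f + 1, i, c =>
    if PySem.Int.mod i 2 = 1 then solLoop f (PySem.Int.floordiv i 2) (c + 1) else c

def solution (numbers : List Int) : List Int :=
  numbers.foldl
    (fun answer i =>
      let c := solLoop (i.natAbs + 1) i 0
      answer ++ [if c ≠ 0 then i + (2 : Int) ^ (c - 1) else i + 1])
    []

-- ===== PORT B =====
-- `_low(i) = 1 if i % 2 == 0 else 2 * _low(i // 2)`; fuel only makes it total
def lowAlt : Nat → Int → Int
  | 0, _ => 1
  | f + 1, i =>
    if PySem.Int.mod i 2 = 0 then 1 else 2 * lowAlt f (PySem.Int.floordiv i 2)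

def solution_alt (numbers : List Int) : List Int :=
  numbers.map (fun i =>
    if PySem.Int.mod i 2 = 0 then i + 1
    else i + lowAlt (i.natAbs + 1) (PySem.Int.floordiv i 2))

-- ===== PRECONDITION & SPEC =====
-- Pre_ excludes lists containing -1, on which A's while loop never terminates
-- (and B's recursion overflows): A returns on every other input.
def Pre_solution (numbers : List Int) : Prop := (-1 : Int) ∉ numbers
instance (numbers : List Int) : Decidable (Pre_solution numbers) := by
  unfold Pre_solution; infer_instance
def pvWitness_solution : List Int := [0, 1, 2, 3, 7, -3, -5]

def Spec_solution (numbers : List Int) (out : List Int) : Prop := out = solution_alt numbers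
instance (numbers : List Int) (out : List Int) : Decidable (Spec_solution numbers out) := by unfold Spec_solution; infer_instance

-- ===== CLAIM (what is proved, stated in full; the proofs are below) =====
def Claim_equal_solution : Prop := ∀ (numbers : List Int), Dom_solution numbers → Pre_solution numbers → Spec_solution numbers (solution numbers)

-- ===== LEMMAS AND PROOFS =====

-- the step of the while loop: for odd i ≠ -1, i // 2 is ≠ -1 and smaller in natAbs
theorem pv_step (i : Int) (hodd : PySem.Int.mod i 2 = 1) (hne : i ≠ -1) :
    PySem.Int.floordiv i 2 ≠ -1 ∧ (PySem.Int.floordiv i 2).natAbs < i.natAbs := by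
  rw [PySem.Int.floordiv_eq_ediv_of_pos (by omega)]
  rw [PySem.Int.mod_eq_emod_of_pos (by omega)] at hodd
  omega

theorem solLoop_acc (f : Nat) : ∀ (i : Int) (c : Nat),
    solLoop f i c = solLoop f i 0 + c := by
  induction f with
  | zero => intro i c; simp [solLoop]
  | succ f ih =>
    intro i c
    simp only [solLoop]
    split
    · rw [ih _ (c + 1), ih _ (0 + 1)]; omega
    · omega

theorem low_eq_pow (f : Nat) : ∀ (g : Nat) (i : Int), i ≠ -1 →
    i.natAbs < f → i.natAbs < g → lowAlt f i = (2 : Int) ^ (solLoop g i 0) := by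
  induction f with
  | zero => intro g i _ hf _; omega
  | succ f ih =>
    intro g i hne hf hg
    match g, hg with
    | g + 1, hg =>
      simp only [lowAlt, solLoop]
      by_cases hz : PySem.Int.mod i 2 = 0
      · have hodd : ¬ PySem.Int.mod i 2 = 1 := by omega
        rw [if_pos hz, if_neg hodd]
        norm_num
      · have hodd : PySem.Int.mod i 2 = 1 := by
          rw [PySem.Int.mod_eq_emod_of_pos (by omega)] at hz ⊢; omega
        obtain ⟨hne', hlt⟩ := pv_step i hodd hne
        rw [if_neg hz, if_pos hodd, solLoop_acc,
          ih g (PySem.Int.floordiv i 2) hne' (by omega) (by omega), pow_succ]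
        ring

-- per-element agreement
theorem elem_eq (i : Int) (hne : i ≠ -1) :
    (let c := solLoop (i.natAbs + 1) i 0
     if c ≠ 0 then i + (2 : Int) ^ (c - 1) else i + 1) =
    (if PySem.Int.mod i 2 = 0 then i + 1
     else i + lowAlt (i.natAbs + 1) (PySem.Int.floordiv i 2)) := by
  by_cases hz : PySem.Int.mod i 2 = 0
  · have hodd : ¬ PySem.Int.mod i 2 = 1 := by omega
    simp only [solLoop, if_neg hodd, if_pos hz]
    norm_num
  · have hodd : PySem.Int.mod i 2 = 1 := by
      rw [PySem.Int.mod_eq_emod_of_pos (by omega)] at hz ⊢; omega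
    obtain ⟨hne', hlt⟩ := pv_step i hodd hne
    have hc : solLoop (i.natAbs + 1) i 0
        = solLoop i.natAbs (PySem.Int.floordiv i 2) 0 + 1 := by
      simp only [solLoop, if_pos hodd]
      exact solLoop_acc _ _ _
    simp only [hc, if_neg hz]
    rw [low_eq_pow (i.natAbs + 1) (i.natAbs) (PySem.Int.floordiv i 2)
      hne' (by omega) (by omega)]
    simp

-- folding appends of singletons is mapping
theorem foldl_append_map (h : Int → Int) (l : List Int) : ∀ (acc : List Int),
    l.foldl (fun a i => a ++ [h i]) acc = acc ++ l.map h := by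
  induction l with
  | nil => intro acc; simp
  | cons x xs ih => intro acc; simp [List.foldl_cons, ih, List.append_assoc]

-- ===== VERDICT (by name: the statement is the Claim_ definition above) =====
theorem solution_spec : Claim_equal_solution := by
  intro numbers _ hpre
  unfold Spec_solution solution solution_alt
  rw [foldl_append_map]
  simp only [List.nil_append]
  apply List.map_congr_left
  intro i hi
  exact elem_eq i (by intro h; exact hpre (h ▸ hi))
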